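-- pv_equiv track=rewrite | github.com/kungfu-team/tenplex | state-transformer/scripts/parse_hostfile.py | get_rank_ip
-- ===== SOURCE A (Python) =====
-- def get_rank_ip(hosts, rank):
--     i = 0
--     for ip, num_slots in hosts:
--         next_host = i + num_slots
--         if i <= rank < next_host:
--             return ip
--         i = next_host
--     return None
-- ===== SOURCE B (Python) =====
-- def get_rank_ip(hosts, rank):
--     # Prefix-sum boundary table + binary search for the owning host.
--     bounds = []
--     total = 0
--     for _, n in hosts:
--         total += n
--         bounds.append(total)
--     if rank < 0 or rank >= total:
--         return None
--     lo, hi = 0, len(bounds)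
--     while lo < hi:
--         mid = (lo + hi) // 2
--         if bounds[mid] <= rank:
--             lo = mid + 1
--         else:
--             hi = mid
--     return hosts[lo][0]
-- ===== Notes on version B (the rewrite author's own statement) =====
-- stated objective: alternative
-- what changed: B builds a prefix-sum boundary table in one pass and binary-searches it for the host owning the rank, instead of A's linear scan with a running offset; Pre_ restricts to the natural domain of non-negative slot counts, where the boundary table is sorted.
-- outside the precondition, e.g. on get_rank_ip([('a', 2), ('b', -2), ('c', 1)], 1): A returns 'a', B returns None
import Mathlib
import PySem

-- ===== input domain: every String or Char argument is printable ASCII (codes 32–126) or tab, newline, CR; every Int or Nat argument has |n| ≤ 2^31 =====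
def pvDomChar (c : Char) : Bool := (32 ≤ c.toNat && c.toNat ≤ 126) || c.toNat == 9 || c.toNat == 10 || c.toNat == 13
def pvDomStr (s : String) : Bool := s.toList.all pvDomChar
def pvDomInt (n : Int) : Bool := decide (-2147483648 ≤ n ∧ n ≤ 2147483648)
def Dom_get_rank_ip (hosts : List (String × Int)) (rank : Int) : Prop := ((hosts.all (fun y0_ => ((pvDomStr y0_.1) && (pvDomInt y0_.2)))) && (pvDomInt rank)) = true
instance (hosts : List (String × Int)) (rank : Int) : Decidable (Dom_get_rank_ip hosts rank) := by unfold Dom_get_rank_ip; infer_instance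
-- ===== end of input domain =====

-- B replaces A's linear running-offset scan by a prefix-sum boundary table plus binary search
-- (alternative decomposition; proved equal on the natural domain of non-negative slot counts).

-- ===== PORT A =====
-- A's for-loop carrying the running offset i, with early return.
def getRankIpGo (rank : Int) : List (String × Int) → Int → Option String
  | [], _ => none
  | (ip, numSlots) :: rest, i =>
    let nextHost := i + numSlots
    if i ≤ rank ∧ rank < nextHost then some ip else getRankIpGo rank rest nextHost

def get_rank_ip (hosts : List (String × Int)) (rank : Int) : Option String :=
  getRankIpGo rank hosts 0

-- ===== PORT B =====
-- B's while-loop binary search on the boundary table (fuel = hi - lo at entry; bounds.length suffices).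
def altSearch (bounds : List Int) (rank : Int) : Nat → Nat → Nat → Nat
  | lo, _, 0 => lo
  | lo, hi, fuel + 1 =>
    if lo < hi then
      let mid := (lo + hi) / 2
      if bounds.getD mid 0 ≤ rank then altSearch bounds rank (mid + 1) hi fuel
      else altSearch bounds rank lo mid fuel
    else lo

def get_rank_ip_alt (hosts : List (String × Int)) (rank : Int) : Option String :=
  let bp := hosts.foldl (fun (acc : List Int × Int) h => (acc.1 ++ [acc.2 + h.2], acc.2 + h.2)) (([] : List Int), (0 : Int))
  if rank < 0 ∨ bp.2 ≤ rank then none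
  else
    let lo := altSearch bp.1 rank 0 bp.1.length bp.1.length
    match PySem.List.pyGet? hosts (lo : Int) with
    | some h => some h.1
    | none => none

-- ===== PRECONDITION & SPEC =====
-- Pre_ restricts to the natural domain of non-negative slot counts (a hostfile's slot count);
-- on negative counts A's running offset goes backwards and B's boundary table is unsorted.
def Pre_get_rank_ip (hosts : List (String × Int)) (rank : Int) : Prop :=
  ∀ h ∈ hosts, 0 ≤ h.2

instance (hosts : List (String × Int)) (rank : Int) : Decidable (Pre_get_rank_ip hosts rank) := by
  unfold Pre_get_rank_ip; infer_instance

def pvWitness_get_rank_ip : (List (String × Int)) × Int := ([("10.0.0.1", 2), ("10.0.0.2", 3)], 3)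

def Spec_get_rank_ip (hosts : List (String × Int)) (rank : Int) (out : Option String) : Prop := out = get_rank_ip_alt hosts rank
instance (hosts : List (String × Int)) (rank : Int) (out : Option String) : Decidable (Spec_get_rank_ip hosts rank out) := by unfold Spec_get_rank_ip; infer_instance

-- ===== CLAIM (what is proved, stated in full; the proofs are below) =====
def Claim_equal_get_rank_ip : Prop := ∀ (hosts : List (String × Int)) (rank : Int), Dom_get_rank_ip hosts rank → Pre_get_rank_ip hosts rank → Spec_get_rank_ip hosts rank (get_rank_ip hosts rank)

-- ===== LEMMAS AND PROOFS =====

-- Reference recursion: subtract each host's slot count from the rank.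
def pvRef : List (String × Int) → Int → Option String
  | [], _ => none
  | (ip, n) :: rest, r => if 0 ≤ r ∧ r < n then some ip else pvRef rest (r - n)

-- prefix-sum boundary list and slot sum
def pvPb : List (String × Int) → Int → List Int
  | [], _ => []
  | (_, n) :: rest, t => (t + n) :: pvPb rest (t + n)

def pvSum : List (String × Int) → Int
  | [] => 0
  | (_, n) :: rest => n + pvSum rest

theorem pvGoA_eq_ref (rank : Int) (hs : List (String × Int)) (i : Int) :
    getRankIpGo rank hs i = pvRef hs (rank - i) := by
  induction hs generalizing i with
  | nil => rfl
  | cons h t ih =>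
    obtain ⟨ip, n⟩ := h
    simp only [getRankIpGo, pvRef]
    have hc : (i ≤ rank ∧ rank < i + n) ↔ (0 ≤ rank - i ∧ rank - i < n) := by omega
    rw [if_congr hc rfl rfl, ih (i + n)]
    ring_nf

theorem pvFold_spec (hs : List (String × Int)) (l : List Int) (t : Int) :
    hs.foldl (fun (acc : List Int × Int) h => (acc.1 ++ [acc.2 + h.2], acc.2 + h.2)) (l, t)
      = (l ++ pvPb hs t, t + pvSum hs) := by
  induction hs generalizing l t with
  | nil => simp [pvPb, pvSum]
  | cons h rest ih =>
    obtain ⟨ip, n⟩ := h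
    simp only [List.foldl_cons, ih, pvPb, pvSum, Prod.mk.injEq]
    exact ⟨by simp, by ring⟩

theorem pvPb_length (hs : List (String × Int)) (t : Int) : (pvPb hs t).length = hs.length := by
  induction hs generalizing t with
  | nil => rfl
  | cons h rest ih => obtain ⟨ip, n⟩ := h; simp [pvPb, ih]

theorem pvPb_lb (hs : List (String × Int)) (t : Int) (hnn : ∀ h ∈ hs, 0 ≤ h.2)
    (j : Nat) (hj : j < hs.length) : t ≤ (pvPb hs t).getD j 0 := by
  induction hs generalizing t j with
  | nil => simp at hj
  | cons h rest ih =>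
    obtain ⟨ip, n⟩ := h
    have hn : 0 ≤ n := hnn (ip, n) (by simp)
    have hrest : ∀ x ∈ rest, 0 ≤ x.2 := fun x hm => hnn x (List.mem_cons_of_mem _ hm)
    cases j with
    | zero => simp [pvPb]; omega
    | succ j' =>
      have := ih (t + n) hrest j' (by simpa using hj)
      simp only [pvPb, List.getD_cons_succ]
      omega

theorem pvPb_sorted (hs : List (String × Int)) (t : Int) (hnn : ∀ h ∈ hs, 0 ≤ h.2)
    (i j : Nat) (hij : i ≤ j) (hj : j < hs.length) :
    (pvPb hs t).getD i 0 ≤ (pvPb hs t).getD j 0 := by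
  induction hs generalizing t i j with
  | nil => simp at hj
  | cons h rest ih =>
    obtain ⟨ip, n⟩ := h
    have hrest : ∀ x ∈ rest, 0 ≤ x.2 := fun x hm => hnn x (List.mem_cons_of_mem _ hm)
    cases i with
    | zero =>
      cases j with
      | zero => exact le_rfl
      | succ j' =>
        have := pvPb_lb rest (t + n) hrest j' (by simpa using hj)
        simp only [pvPb, List.getD_cons_zero, List.getD_cons_succ]
        omega
    | succ i' =>
      cases j with
      | zero => omega
      | succ j' =>
        have := ih (t + n) hrest i' j' (by omega) (by simpa using hj)
        simpa [pvPb] using this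

theorem pvPb_last (hs : List (String × Int)) (t : Int) (hne : hs ≠ []) :
    (pvPb hs t).getD (hs.length - 1) 0 = t + pvSum hs := by
  induction hs generalizing t with
  | nil => exact absurd rfl hne
  | cons h rest ih =>
    obtain ⟨ip, n⟩ := h
    cases rest with
    | nil => simp [pvPb, pvSum]
    | cons h2 r2 =>
      have := ih (t + n) (by simp)
      simp only [pvPb, pvSum, List.length_cons, Nat.add_sub_cancel] at this ⊢
      simp only [List.getD_cons_succ]
      rw [this]; ring

theorem pvPb_shift (rest : List (String × Int)) (t : Int) (j : Nat) (hj : j < rest.length) :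
    (pvPb rest t).getD j 0 = t + (pvPb rest 0).getD j 0 := by
  induction rest generalizing t j with
  | nil => simp at hj
  | cons h2 r2 ih =>
    obtain ⟨ip2, n2⟩ := h2
    cases j with
    | zero => simp [pvPb]
    | succ j' =>
      have e1 := ih (t + n2) j' (by simpa using hj)
      have e2 := ih (0 + n2) j' (by simpa using hj)
      simp only [pvPb, List.getD_cons_succ]
      omega

-- binary-search invariant
theorem pvSearch_spec (b : List Int) (rank : Int)
    (hsort : ∀ i j : Nat, i ≤ j → j < b.length → b.getD i 0 ≤ b.getD j 0) :
    ∀ (fuel lo hi : Nat), lo ≤ hi → hi ≤ b.length → hi - lo ≤ fuel →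
    (∀ j : Nat, j < lo → b.getD j 0 ≤ rank) →
    (∀ j : Nat, hi ≤ j → j < b.length → rank < b.getD j 0) →
    (∀ j : Nat, j < altSearch b rank lo hi fuel → b.getD j 0 ≤ rank) ∧
    (∀ j : Nat, altSearch b rank lo hi fuel ≤ j → j < b.length → rank < b.getD j 0) ∧
    altSearch b rank lo hi fuel ≤ b.length := by
  intro fuel
  induction fuel with
  | zero =>
    intro lo hi hlh hhl hf hlow hhigh
    have heq : lo = hi := by omega
    subst heq
    simp only [altSearch]
    exact ⟨hlow, hhigh, by omega⟩
  | succ f ih =>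
    intro lo hi hlh hhl hf hlow hhigh
    by_cases hlt : lo < hi
    · simp only [altSearch, if_pos hlt]
      by_cases hb : b.getD ((lo + hi) / 2) 0 ≤ rank
      · simp only [if_pos hb]
        refine ih ((lo + hi) / 2 + 1) hi (by omega) hhl (by omega) ?_ hhigh
        intro j hj
        by_cases hjlo : j < lo
        · exact hlow j hjlo
        · exact le_trans (hsort j ((lo + hi) / 2) (by omega) (by omega)) hb
      · simp only [if_neg hb]
        refine ih lo ((lo + hi) / 2) (by omega) (by omega) (by omega) hlow ?_
        intro j hj hjl
        exact lt_of_lt_of_le (by omega) (hsort ((lo + hi) / 2) j hj hjl)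
    · simp only [altSearch, if_neg hlt]
      have heq : lo = hi := by omega
      subst heq
      exact ⟨hlow, hhigh, by omega⟩

theorem pvRef_neg (hs : List (String × Int)) (r : Int) (hnn : ∀ h ∈ hs, 0 ≤ h.2) (hr : r < 0) :
    pvRef hs r = none := by
  induction hs generalizing r with
  | nil => rfl
  | cons h rest ih =>
    obtain ⟨ip, n⟩ := h
    have hn : 0 ≤ n := hnn (ip, n) (by simp)
    have hrest : ∀ x ∈ rest, 0 ≤ x.2 := fun x hm => hnn x (List.mem_cons_of_mem _ hm)
    simp only [pvRef, if_neg (by omega : ¬ (0 ≤ r ∧ r < n))]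
    exact ih (r - n) hrest (by omega)

theorem pvSum_nonneg (hs : List (String × Int)) (hnn : ∀ h ∈ hs, 0 ≤ h.2) : 0 ≤ pvSum hs := by
  induction hs with
  | nil => simp [pvSum]
  | cons h rest ih =>
    obtain ⟨ip, n⟩ := h
    have hn : 0 ≤ n := hnn (ip, n) (by simp)
    have := ih (fun x hm => hnn x (List.mem_cons_of_mem _ hm))
    simp only [pvSum]; omega

theorem pvRef_big (hs : List (String × Int)) (r : Int) (hnn : ∀ h ∈ hs, 0 ≤ h.2)
    (hr : pvSum hs ≤ r) : pvRef hs r = none := by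
  induction hs generalizing r with
  | nil => rfl
  | cons h rest ih =>
    obtain ⟨ip, n⟩ := h
    have hn : 0 ≤ n := hnn (ip, n) (by simp)
    have hrest : ∀ x ∈ rest, 0 ≤ x.2 := fun x hm => hnn x (List.mem_cons_of_mem _ hm)
    have hs0 := pvSum_nonneg rest hrest
    simp only [pvSum] at hr
    simp only [pvRef, if_neg (by omega : ¬ (0 ≤ r ∧ r < n))]
    exact ih (r - n) hrest (by omega)

theorem pvRef_idx (hs : List (String × Int)) (r : Int) (k : Nat)
    (hnn : ∀ h ∈ hs, 0 ≤ h.2) (hr : 0 ≤ r) (hk : k < hs.length)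
    (hlow : ∀ j : Nat, j < k → (pvPb hs 0).getD j 0 ≤ r)
    (hhigh : r < (pvPb hs 0).getD k 0) :
    pvRef hs r = some (hs.getD k ("", 0)).1 := by
  induction hs generalizing r k with
  | nil => simp at hk
  | cons h rest ih =>
    obtain ⟨ip, n⟩ := h
    have hrest : ∀ x ∈ rest, 0 ≤ x.2 := fun x hm => hnn x (List.mem_cons_of_mem _ hm)
    cases k with
    | zero =>
      simp only [pvPb, List.getD_cons_zero, zero_add] at hhigh
      simp only [pvRef, List.getD_cons_zero]
      rw [if_pos (⟨hr, hhigh⟩ : 0 ≤ r ∧ r < n)]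
    | succ k' =>
      have hn0 : (pvPb ((ip, n) :: rest) 0).getD 0 0 ≤ r := hlow 0 (by omega)
      simp only [pvPb, List.getD_cons_zero, zero_add] at hn0
      have hk' : k' < rest.length := by simpa using hk
      simp only [pvRef, if_neg (by omega : ¬ (0 ≤ r ∧ r < n)), List.getD_cons_succ]
      refine ih (r - n) k' hrest (by omega) hk' ?_ ?_
      · intro j hj
        have := hlow (j + 1) (by omega)
        simp only [pvPb, List.getD_cons_succ, zero_add] at this
        rw [pvPb_shift rest n j (by omega)] at this
        omega
      · have := hhigh
        simp only [pvPb, List.getD_cons_succ, zero_add] at this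
        rw [pvPb_shift rest n k' hk'] at this
        omega

theorem pvAlt_eq_ref (hosts : List (String × Int)) (rank : Int)
    (hnn : ∀ h ∈ hosts, 0 ≤ h.2) :
    get_rank_ip_alt hosts rank = pvRef hosts rank := by
  unfold get_rank_ip_alt
  rw [pvFold_spec hosts [] 0]
  simp only [List.nil_append, zero_add]
  by_cases hg : rank < 0 ∨ pvSum hosts ≤ rank
  · rw [if_pos hg]
    rcases hg with hg | hg
    · exact (pvRef_neg hosts rank hnn hg).symm
    · exact (pvRef_big hosts rank hnn hg).symm
  · rw [if_neg hg]
    push Not at hg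
    obtain ⟨hr0, hrlt⟩ := hg
    have hne : hosts ≠ [] := by
      rintro rfl
      simp [pvSum] at hrlt
      omega
    have hlen := pvPb_length hosts 0
    have hsp := pvSearch_spec (pvPb hosts 0) rank
      (by intro i j hij hj; exact pvPb_sorted hosts 0 hnn i j hij (by omega))
      (pvPb hosts 0).length 0 (pvPb hosts 0).length (by omega) (by omega) (by omega)
      (by intro j hj; omega)
      (by intro j hj1 hj2; omega)
    set r := altSearch (pvPb hosts 0) rank 0 (pvPb hosts 0).length (pvPb hosts 0).length with hrdef
    obtain ⟨hlow, hhigh, hle⟩ := hsp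
    have hlast := pvPb_last hosts 0 hne
    have hlen0 : 0 < hosts.length := List.length_pos_iff.mpr hne
    have hrlt_len : r < hosts.length := by
      by_contra hc
      push Not at hc
      have hre : r = hosts.length := by omega
      have := hlow (hosts.length - 1) (by omega)
      rw [hlast] at this
      omega
    have hget : PySem.List.pyGet? hosts (r : Int) = some (hosts.getD r ("", 0)) := by
      rw [PySem.List.pyGet?_natCast]
      rw [List.getElem?_eq_getElem hrlt_len]
      rw [List.getD_eq_getElem _ _ hrlt_len]
    rw [hget]
    exact (pvRef_idx hosts rank r hnn hr0 hrlt_len hlow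
      (hhigh r (le_refl _) (by omega))).symm

-- ===== VERDICT (by name: the statement is the Claim_ definition above) =====
theorem get_rank_ip_spec : Claim_equal_get_rank_ip := by
  intro hosts rank _hdom hpre
  unfold Spec_get_rank_ip
  rw [pvAlt_eq_ref hosts rank hpre]
  unfold get_rank_ip
  rw [pvGoA_eq_ref rank hosts 0]
  norm_num
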